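/- GENERATED by farm/mkstatement.py from design/units.tsv (unit `GifAddExtensionBlock.COMPOSITION`) and the Specs of Gif/Spec/*.lean — do not edit.
   THE STATEMENT of the proof unit `GifAddExtensionBlock.COMPOSITION`: the function `GifAddExtensionBlock` (88 instructions) satisfies its contract,
   GIVEN THE STATEMENTS OF ITS 4 SEGMENTS (`Gif.Spec.GifAddExtensionBlock.Seg<k> Lay μ u₀`: what the unit `GifAddExtensionBlock.<k>` proves).
   No machine code is walked: `ReachVia.trans` along the segments (the exit assertion of a segment is the entry assertion of
   its successor), an induction on the loop measures. What the names mean: ProgX/Base/Spec/Basic.lean. The theorem to prove: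
   `theorem GifAddExtensionBlock_COMPOSITION_ok : Gif.Spec.GifAddExtensionBlock_COMPOSITION.Statement`. -/
import Gif.Code
import Gif.Dec.All
import Gif.Labels
import Gif.Spec.Alloc
import Gif.Spec.Seg_GifAddExtensionBlock
namespace Gif.Spec.GifAddExtensionBlock_COMPOSITION
open X86 X86.User Asan

/-- The statement of unit `GifAddExtensionBlock.COMPOSITION`. -/
def Statement : Prop :=
  ∀ (Lay : Layout) (_hLay : Lay.hi = 0x1000000) (μ : Microarch) (_hμ : UserX.MicroOK μ) (u₀ : State)
    (_h_GifAddExtensionBlock_1 : Gif.Spec.GifAddExtensionBlock.Seg1 Lay μ u₀)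
    (_h_GifAddExtensionBlock_2 : Gif.Spec.GifAddExtensionBlock.Seg2 Lay μ u₀)
    (_h_GifAddExtensionBlock_3 : Gif.Spec.GifAddExtensionBlock.Seg3 Lay μ u₀)
    (_h_GifAddExtensionBlock_E : Gif.Spec.GifAddExtensionBlock.SegE Lay μ u₀),
    ∀ (H : Heap) (rest : List Obj) (frames : List (Nat × FrameLayout)) (F : Forest) (R : Rd) (len : Nat), Calls Lay μ ProgX.Base.WayInv (ProgX.Base.conv u₀) Gif.L.GifAddExtensionBlock.entry (Gif.Spec.GifAddExtensionBlock.spec H rest frames F R len)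

end Gif.Spec.GifAddExtensionBlock_COMPOSITION
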